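-- pv_equiv track=rewrite | github.com/TinoH001/Lab | lab1.py | Decimal_to_BI_OCT_HEX
-- ===== SOURCE A (Python) =====
-- numbers_hexadecimal = {10: "A", 11: "B", 12: "C", 13: "D", 14: "E", 15: "F"}
--
-- def Decimal_to_BI_OCT_HEX(decimal_list,base):
--     x_base_conversions = []
--     for i in decimal_list:
--         group = ""
--         while i > 0:
--             remainder = i % base
--             i = i // base
--             if remainder in numbers_hexadecimal:
--                 remainder = numbers_hexadecimal[remainder]
--             group = str(remainder) + group
--         x_base_conversions.append(group)
--     return x_base_conversions
-- ===== SOURCE B (Python) =====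
-- numbers_hexadecimal = {10: "A", 11: "B", 12: "C", 13: "D", 14: "E", 15: "F"}
--
-- def _convert(n, base):
--     if n <= 0:
--         return ""
--     r = n % base
--     return _convert(n // base, base) + numbers_hexadecimal.get(r, str(r))
--
-- def Decimal_to_BI_OCT_HEX(decimal_list, base):
--     return [_convert(i, base) for i in decimal_list]
-- ===== Notes on version B (the rewrite author's own statement) =====
-- stated objective: simpler
-- what changed: Replaces A's iterative while-loop that prepends digit strings to a mutable accumulator with a direct recursive formulation of the base-conversion recurrence (convert(n) = convert(n // base) + digit(n % base), '' at n <= 0), building each string front-to-back with no accumulator, and a list comprehension for the outer loop.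
import Mathlib
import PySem

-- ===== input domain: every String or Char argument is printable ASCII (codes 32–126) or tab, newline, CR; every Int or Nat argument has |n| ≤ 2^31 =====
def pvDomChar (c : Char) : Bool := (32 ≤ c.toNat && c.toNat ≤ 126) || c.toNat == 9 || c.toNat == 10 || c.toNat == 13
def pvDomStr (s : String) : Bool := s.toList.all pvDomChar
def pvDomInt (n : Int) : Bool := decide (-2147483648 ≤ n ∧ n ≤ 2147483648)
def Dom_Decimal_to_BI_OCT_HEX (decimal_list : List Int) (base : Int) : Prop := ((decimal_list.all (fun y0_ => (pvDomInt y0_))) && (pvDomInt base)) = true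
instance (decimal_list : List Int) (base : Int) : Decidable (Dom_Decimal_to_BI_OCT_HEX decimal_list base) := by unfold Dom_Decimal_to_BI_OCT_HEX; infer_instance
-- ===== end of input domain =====

-- B replaces A's accumulator while-loop by a direct recursive formulation of the
-- base-conversion recurrence, building each string front-to-back (objective: simpler).

-- ===== PORT A =====
-- the module-level dict numbers_hexadecimal
def pvHexDict : PySem.Dict Int String :=
  PySem.Dict.ofList [(10, "A"), (11, "B"), (12, "C"), (13, "D"), (14, "E"), (15, "F")]

-- A's inner 'while i > 0' loop; the fuel (i.natAbs + 1 at the call site) only makes the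
-- recursion total in Lean — wherever the Python loop finishes it does so within that fuel.
-- PySem.Int.mod / floordiv are exact for base ≠ 0 (base = 0 is a ZeroDivisionError in
-- Python, excluded by Pre_).
def pvLoopA (base : Int) : Nat → Int → String → String
  | 0, _, group => group
  | f + 1, i, group =>
    if i > 0 then
      let remainder := PySem.Int.mod i base
      let i' := PySem.Int.floordiv i base
      let d := match pvHexDict.get? remainder with
        | some s => s                       -- remainder in numbers_hexadecimal
        | none => PySem.Int.toStr remainder -- str(remainder)
      pvLoopA base f i' (d ++ group)
    else group

def Decimal_to_BI_OCT_HEX (decimal_list : List Int) (base : Int) : List String :=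
  decimal_list.foldl (fun acc i => acc ++ [pvLoopA base (i.natAbs + 1) i ""]) []

-- ===== PORT B =====
-- Source B's recursive _convert; none = Python's RecursionError when the recursion never
-- bottoms out (fuel i.natAbs + 1 is enough wherever the Python recursion terminates).
-- PySem.Int.mod / floordiv are exact for base ≠ 0 (excluded by Pre_).
def pvConvertB (base : Int) : Nat → Int → Option String
  | 0, _ => none
  | f + 1, n =>
    if n ≤ 0 then some ""
    else
      let r := PySem.Int.mod n base
      (pvConvertB base f (PySem.Int.floordiv n base)).map
        (fun s => s ++ (match pvHexDict.get? r with    -- numbers_hexadecimal.get(r, str(r))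
          | some d => d
          | none => PySem.Int.toStr r))

def Decimal_to_BI_OCT_HEX_alt (decimal_list : List Int) (base : Int) : List String :=
  -- .getD "" : an arbitrary value where the Python raises (outside Pre_)
  decimal_list.map (fun i => (pvConvertB base (i.natAbs + 1) i).getD "")

-- ===== PRECONDITION & SPEC =====
-- Pre_ excludes base == 0, where Python's '%' raises ZeroDivisionError in both programs,
-- and base == 1 with a positive element, where A loops forever (returns nothing) and
-- B's recursion raises RecursionError.
def Pre_Decimal_to_BI_OCT_HEX (decimal_list : List Int) (base : Int) : Prop :=
  base ≠ 0 ∧ (base = 1 → decimal_list.all (fun i => i ≤ 0) = true)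
instance (decimal_list : List Int) (base : Int) : Decidable (Pre_Decimal_to_BI_OCT_HEX decimal_list base) := by unfold Pre_Decimal_to_BI_OCT_HEX; infer_instance

def pvWitness_Decimal_to_BI_OCT_HEX : List Int × Int := ([0, 1, 5, 255], 16)

def Spec_Decimal_to_BI_OCT_HEX (decimal_list : List Int) (base : Int) (out : List String) : Prop := out = Decimal_to_BI_OCT_HEX_alt decimal_list base
instance (decimal_list : List Int) (base : Int) (out : List String) : Decidable (Spec_Decimal_to_BI_OCT_HEX decimal_list base out) := by unfold Spec_Decimal_to_BI_OCT_HEX; infer_instance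

-- ===== CLAIM (what is proved, stated in full; the proofs are below) =====
def Claim_equal_Decimal_to_BI_OCT_HEX : Prop := ∀ (decimal_list : List Int) (base : Int), Dom_Decimal_to_BI_OCT_HEX decimal_list base → Pre_Decimal_to_BI_OCT_HEX decimal_list base → Spec_Decimal_to_BI_OCT_HEX decimal_list base (Decimal_to_BI_OCT_HEX decimal_list base)

-- ===== LEMMAS AND PROOFS =====

-- for base ∉ {0, 1}, enough fuel makes B's recursion bottom out, with A's loop producing
-- the same string prepended to its accumulator
theorem pvConvertB_some (b : Int) (hb0 : b ≠ 0) (hb1 : b ≠ 1) :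
    ∀ (f : Nat) (i : Int), ((i ≤ 0 ∧ 1 ≤ f) ∨ i.natAbs < f) →
      ∃ s, pvConvertB b f i = some s ∧ ∀ group, pvLoopA b f i group = s ++ group := by
  intro f
  induction f with
  | zero => intro i h; rcases h with ⟨_, h⟩ | h <;> omega
  | succ f ih =>
    intro i h
    by_cases hi : i ≤ 0
    · refine ⟨"", ?_, ?_⟩
      · simp [pvConvertB, hi]
      · intro group
        have hng : ¬ i > 0 := by omega
        simp [pvLoopA, hng]
    · have hipos : 0 < i := by omega
      have hfuel : (PySem.Int.floordiv i b).natAbs < f ∨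
          (PySem.Int.floordiv i b ≤ 0 ∧ 1 ≤ f) := by
        have hf1 : 1 ≤ f := by rcases h with ⟨h', _⟩ | h' <;> omega
        by_cases hbpos : 0 < b
        · have hb2 : 2 ≤ b := by omega
          have heq : PySem.Int.floordiv i b = i / b :=
            PySem.Int.floordiv_eq_ediv_of_pos hbpos
          have hq0 : 0 ≤ i / b := Int.ediv_nonneg (by omega) (by omega)
          have h2q : i / b * 2 ≤ i := by
            have hm := mul_le_mul_of_nonneg_left hb2 hq0
            have hsum := Int.mul_ediv_add_emod i b
            have hr := Int.emod_nonneg i hb0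
            nlinarith
          have hlt : i / b < i := by linarith
          left
          rcases h with ⟨h', _⟩ | h'
          · omega
          · rw [heq]; omega
        · -- b < 0: one division step lands at ≤ 0
          have hbneg : b < 0 := by omega
          right
          refine ⟨?_, hf1⟩
          by_contra hq
          have hq1 : 1 ≤ PySem.Int.floordiv i b := by omega
          have hmul : PySem.Int.floordiv i b * b ≤ 1 * b :=
            mul_le_mul_of_nonpos_right hq1 (le_of_lt hbneg)
          have hsum := PySem.Int.floordiv_mul_add_mod i b
          have hmod := (PySem.Int.mod_neg_bounds (a := i) hbneg).2
          omega
      have hrec : ((PySem.Int.floordiv i b ≤ 0 ∧ 1 ≤ f) ∨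
          (PySem.Int.floordiv i b).natAbs < f) := by tauto
      obtain ⟨s, hs, hloop⟩ := ih (PySem.Int.floordiv i b) hrec
      refine ⟨s ++ (match pvHexDict.get? (PySem.Int.mod i b) with
          | some d => d
          | none => PySem.Int.toStr (PySem.Int.mod i b)), ?_, ?_⟩
      · simp [pvConvertB, hi, hs]
      · intro group
        simp only [pvLoopA, if_pos hipos]
        rw [hloop]
        simp [String.append_assoc]

-- per-element agreement under Pre_'s conditions
theorem pvElem_eq (b : Int) (hb0 : b ≠ 0) (i : Int) (h1 : b = 1 → i ≤ 0) :
    pvLoopA b (i.natAbs + 1) i "" = (pvConvertB b (i.natAbs + 1) i).getD "" := by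
  by_cases hb1 : b = 1
  · have hi : i ≤ 0 := h1 hb1
    have hng : ¬ i > 0 := by omega
    simp [pvLoopA, pvConvertB, hng, hi]
  · obtain ⟨s, hs, hloop⟩ := pvConvertB_some b hb0 hb1 (i.natAbs + 1) i (by omega)
    rw [hs, hloop]
    simp

-- ===== VERDICT (by name: the statement is the Claim_ definition above) =====
theorem Decimal_to_BI_OCT_HEX_spec : Claim_equal_Decimal_to_BI_OCT_HEX := by
  intro decimal_list base _ hpre
  obtain ⟨hb0, hb1⟩ := hpre
  unfold Spec_Decimal_to_BI_OCT_HEX Decimal_to_BI_OCT_HEX Decimal_to_BI_OCT_HEX_alt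
  rw [PySem.List.foldl_append_singleton_eq_map]
  refine List.map_congr_left ?_
  intro i hi
  refine pvElem_eq base hb0 i (fun h => ?_)
  have := hb1 h
  simp only [List.all_eq_true] at this
  have := this i hi
  simpa using this
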